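-- pv_equiv track=rewrite | github.com/redaperol/AdventOfCode | 2025/day2/main.py | validate_Nnumber
-- ===== SOURCE A (Python) =====
-- def create_nchunk(string_eval, number_of_chunk):
--     size_chunk = len(string_eval) // number_of_chunk
--     start = 0
--     end = size_chunk
--     result = []
--     for c in range(0, number_of_chunk):
--         result.append(string_eval[start:end])
--         start = end
--         end += size_chunk
--     return result
--
-- def validate_list(list):
--     itera = iter(list)
--     try:
--         first = next(itera)
--     except StopIteration:
--         return True
--     return all(first == x for x in itera)
--
-- def validate_Nnumber(number):
--     start = len(number)
--     while start != 2:
--         if len(number) % start == 0: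
--             to_eval = create_nchunk(number, start)
--             if validate_list(to_eval):
--                 return True
--             else:
--                 start -= 1
--         else:
--             start -= 1
--     return False
-- ===== SOURCE B (Python) =====
-- def validate_Nnumber(number):
--     n = len(number)
--     for c in range(1, n // 3 + 1):
--         if n % c == 0 and number[c:] == number[:-c]:
--             return True
--     return False
-- ===== Notes on version B (the rewrite author's own statement) =====
-- stated objective: alternative
-- what changed: B scans candidate chunk sizes (period lengths) ascending and tests repetition with a single shifted-slice comparison number[c:] == number[:-c], instead of A's descending scan over chunk counts that materialises the list of chunks and compares them all; B does a third as many divisibility tests and replaces A's per-divisor chunk-list construction and chunk-by-chunk comparison with one slice comparison.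
-- intended difference: On single-character strings A returns True (its loop degenerately accepts k=1 chunk), while B returns False, which is intended: a 1-char string is not a concatenation of 3 or more identical chunks. — e.g. on validate_Nnumber("a"): A returns true, B returns false
import Mathlib
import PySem

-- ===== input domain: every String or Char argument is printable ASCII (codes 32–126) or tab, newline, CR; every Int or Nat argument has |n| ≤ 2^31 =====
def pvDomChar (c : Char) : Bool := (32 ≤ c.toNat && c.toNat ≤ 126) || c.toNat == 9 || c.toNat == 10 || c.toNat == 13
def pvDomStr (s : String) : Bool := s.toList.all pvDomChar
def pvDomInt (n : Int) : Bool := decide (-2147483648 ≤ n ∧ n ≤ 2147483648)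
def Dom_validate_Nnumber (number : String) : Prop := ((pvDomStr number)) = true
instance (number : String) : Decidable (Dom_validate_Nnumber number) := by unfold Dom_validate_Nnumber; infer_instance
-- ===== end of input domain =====

-- B tests repetition per candidate chunk size with one shifted-slice comparison (ascending periods) instead of A's
-- descending chunk-count scan that builds the chunk list and compares all chunks; A = B except on 1-char strings (D_).


-- ===== PORT A =====
def create_nchunk (string_eval : List Char) (number_of_chunk : Int) : List (List Char) :=
  let size_chunk := PySem.Int.floordiv (string_eval.length : Int) number_of_chunk
  let st := (PySem.List.pyRange 0 number_of_chunk 1).foldl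
    (fun (acc : List (List Char) × Int × Int) (_c : Int) =>
      (acc.1 ++ [PySem.List.slice string_eval (some acc.2.1) (some acc.2.2)], acc.2.2, acc.2.2 + size_chunk))
    ([], 0, size_chunk)
  st.1

def validate_list (l : List (List Char)) : Bool :=
  match l with
  | [] => true
  | first :: itera => itera.all (fun x => first == x)

-- the while-loop of validate_Nnumber, recursing on the decreasing counter `start`
-- (`vloopA L 0` is only reached on the empty string, where Python raises ZeroDivisionError; that input is outside Pre_)
def vloopA (number : List Char) : Nat → Bool
  | 0 => false
  | s + 1 =>
    if s + 1 = 2 then false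
    else if PySem.Int.mod (number.length : Int) ((s : Int) + 1) == 0 then
      if validate_list (create_nchunk number ((s : Int) + 1)) then true
      else vloopA number s
    else vloopA number s

def validate_Nnumber (number : String) : Bool :=
  vloopA number.toList number.toList.length

-- ===== PORT B =====
def validate_Nnumber_alt (number : String) : Bool :=
  let L := number.toList
  let n : Int := (L.length : Int)
  (PySem.List.pyRange 1 (PySem.Int.floordiv n 3 + 1) 1).any (fun c =>
    PySem.Int.mod n c == 0 &&
      PySem.List.slice L (some c) none == PySem.List.slice L none (some (-c)))

-- ===== PRECONDITION & SPEC =====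
-- Pre_ excludes only the empty string, on which A raises ZeroDivisionError (len(number) % 0).
def Pre_validate_Nnumber (number : String) : Prop := number.toList ≠ []
instance (number : String) : Decidable (Pre_validate_Nnumber number) := by
  unfold Pre_validate_Nnumber; infer_instance
def pvWitness_validate_Nnumber : String := "abcabc"

-- On single-character strings A returns True (its loop degenerately accepts the k=1 chunking),
-- B returns False, which is intended: one character is not 3 or more identical chunks.
def D_validate_Nnumber (number : String) : Prop := number.toList.length = 1
instance (number : String) : Decidable (D_validate_Nnumber number) := by
  unfold D_validate_Nnumber; infer_instance

def Spec_validate_Nnumber (number : String) (out : Bool) : Prop :=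
  ¬ D_validate_Nnumber number → out = validate_Nnumber_alt number
instance (number : String) (out : Bool) : Decidable (Spec_validate_Nnumber number out) := by
  unfold Spec_validate_Nnumber; infer_instance

def pvDiffWitness_validate_Nnumber : String := "a"
def pvDiffWitnessOut_validate_Nnumber : Bool × Bool := (true, false)

-- ===== CLAIM (what is proved, stated in full; the proofs are below) =====
def Claim_unchanged_validate_Nnumber : Prop := ∀ (number : String), Dom_validate_Nnumber number → Pre_validate_Nnumber number → Spec_validate_Nnumber number (validate_Nnumber number)
def Claim_changed_validate_Nnumber : Prop := Dom_validate_Nnumber (pvDiffWitness_validate_Nnumber) ∧ Pre_validate_Nnumber (pvDiffWitness_validate_Nnumber) ∧ D_validate_Nnumber (pvDiffWitness_validate_Nnumber) ∧ validate_Nnumber (pvDiffWitness_validate_Nnumber) = pvDiffWitnessOut_validate_Nnumber.1 ∧ validate_Nnumber_alt (pvDiffWitness_validate_Nnumber) = pvDiffWitnessOut_validate_Nnumber.2 ∧ pvDiffWitnessOut_validate_Nnumber.1 ≠ pvDiffWitnessOut_validate_Nnumber.2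
def Claim_exact_validate_Nnumber : Prop := ∀ (number : String), Dom_validate_Nnumber number → Pre_validate_Nnumber number → D_validate_Nnumber number → validate_Nnumber number ≠ validate_Nnumber_alt number

-- ===== LEMMAS AND PROOFS =====

-- if L agrees with its c-shift pointwise, every index reads as its residue mod c
theorem per_mod (L : List Char) (c : Nat) (hc : 1 ≤ c)
    (h : ∀ j, j + c < L.length → L[j+c]? = L[j]?) :
    ∀ j, j < L.length → L[j]? = L[j % c]? := by
  intro j
  induction j using Nat.strong_induction_on with
  | _ j ih =>
    intro hj
    by_cases hjc : j < c
    · rw [Nat.mod_eq_of_lt hjc]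
    · have hjc' : c ≤ j := by omega
      have h1 : (j - c) + c = j := Nat.sub_add_cancel hjc'
      have h2 : (j - c) + c < L.length := by omega
      have hstep := h (j - c) h2
      rw [h1] at hstep
      rw [hstep, ih (j - c) (by omega) (by omega)]
      congr 1
      conv_rhs => rw [← h1]
      rw [Nat.add_mod_right]

-- B's test: drop c = take (n-c)  ↔  pointwise c-periodicity
theorem shift_iff (L : List Char) (c : Nat) (hcn : c ≤ L.length) :
    (L.drop c = L.take (L.length - c)) ↔ (∀ j, j + c < L.length → L[j+c]? = L[j]?) := by
  constructor
  · intro he j hj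
    have := congrArg (fun l => l[j]?) he
    simp only at this
    rw [List.getElem?_drop, List.getElem?_take_of_lt (by omega)] at this
    rw [Nat.add_comm] at this
    exact this
  · intro h
    apply List.ext_getElem?
    intro i
    rw [List.getElem?_drop]
    by_cases hi : i < L.length - c
    · rw [List.getElem?_take_of_lt hi, Nat.add_comm, h i (by omega)]
    · rw [List.getElem?_eq_none (by omega), List.getElem?_eq_none (by rw [List.length_take]; omega)]

-- A's test: all k chunks of size c equal the first  ↔  pointwise c-periodicity  (n = k*c)
theorem chunks_iff (L : List Char) (k c : Nat) (hc : 1 ≤ c)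
    (hn : L.length = k * c) :
    (∀ i, i < k → (L.drop (i*c)).take c = L.take c) ↔
    (∀ j, j + c < L.length → L[j+c]? = L[j]?) := by
  constructor
  · intro hch j hj
    set i := j / c with hi
    set r := j % c with hr
    have hrc : r < c := Nat.mod_lt _ (by omega)
    have hij : i * c + r = j := by rw [hi, hr, Nat.mul_comm]; exact Nat.div_add_mod j c
    have e : (i+1)*c = i*c + c := by ring
    have h1 : (i+1)*c < k*c := by omega
    have hik : i + 1 < k := Nat.lt_of_mul_lt_mul_right h1
    have e1 := congrArg (fun l => l[r]?) (hch (i+1) (by omega))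
    have e2 := congrArg (fun l => l[r]?) (hch i (by omega))
    simp only at e1 e2
    rw [List.getElem?_take_of_lt hrc, List.getElem?_drop] at e1 e2
    rw [List.getElem?_take_of_lt hrc] at e1 e2
    have hje : (i+1)*c + r = j + c := by omega
    rw [hje] at e1
    rw [hij] at e2
    rw [e1, e2]
  · intro h i hik
    have hmod := per_mod L c hc h
    apply List.ext_getElem?
    intro r
    by_cases hrc : r < c
    · rw [List.getElem?_take_of_lt hrc, List.getElem?_take_of_lt hrc, List.getElem?_drop]
      have h1 : i*c + r < L.length := by
        have e : (i+1)*c = i*c + c := by ring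
        have h2 : (i+1)*c ≤ k*c := Nat.mul_le_mul_right c (by omega)
        omega
      rw [hmod (i*c+r) h1, hmod r (by omega)]
      congr 1
      rw [Nat.add_comm, Nat.add_mul_mod_self_right]
    · rw [List.getElem?_eq_none (by rw [List.length_take]; omega),
          List.getElem?_eq_none (by rw [List.length_take]; omega)]

-- the fold inside create_nchunk produces the list of consecutive slices
theorem fold_chunks (L : List Char) (cz : Int) (k : Nat) :
    ∀ (res : List (List Char)) (st : Int),
    ((PySem.List.pyRange 0 (k : Int) 1).foldl
      (fun (acc : List (List Char) × Int × Int) (_c : Int) =>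
        (acc.1 ++ [PySem.List.slice L (some acc.2.1) (some acc.2.2)], acc.2.2, acc.2.2 + cz))
      (res, st, st + cz))
    = (res ++ (List.range k).map (fun (i : Nat) => PySem.List.slice L (some (st + (i : Int) * cz)) (some (st + (i : Int) * cz + cz))),
       st + k * cz, st + k * cz + cz) := by
  induction k with
  | zero => intro res st; simp
  | succ k ih =>
    intro res st
    have hcast : ((k + 1 : Nat) : Int) = (k : Int) + 1 := by push_cast; ring
    rw [hcast, PySem.List.pyRange_one_succ_right (by positivity), List.foldl_append, ih]
    simp only [List.foldl_cons, List.foldl_nil, List.range_succ, List.map_append, List.map_cons,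
      List.map_nil, List.append_assoc]
    rw [Prod.mk.injEq, Prod.mk.injEq]
    exact ⟨rfl, by ring, by ring⟩

theorem create_nchunk_eq (L : List Char) (k : Nat) :
    create_nchunk L (k : Int) = (List.range k).map (fun i => (L.drop (i * (L.length / k))).take (L.length / k)) := by
  have hfd : PySem.Int.floordiv (L.length : Int) (k : Int) = ((L.length / k : Nat) : Int) :=
    PySem.Int.floordiv_natCast _ _
  have key := fold_chunks L ((L.length / k : Nat) : Int) k [] 0
  rw [zero_add] at key
  simp only [create_nchunk, hfd, key, List.nil_append]
  apply List.map_congr_left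
  intro i _
  have h1 : (0 : Int) + (i : Int) * ((L.length / k : Nat) : Int) = ((i * (L.length / k) : Nat) : Int) := by
    push_cast; ring
  rw [h1, PySem.List.slice_natCast_add]

theorem validate_list_map_range (k : Nat) (hk : 1 ≤ k) (f : Nat → List Char) :
    (validate_list ((List.range k).map f) = true) ↔ (∀ i, i < k → f i = f 0) := by
  obtain ⟨m, rfl⟩ : ∃ m, k = m + 1 := ⟨k - 1, by omega⟩
  rw [List.range_succ_eq_map]
  simp only [List.map_cons, List.map_map, validate_list, List.all_eq_true, List.mem_map,
    List.mem_range]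
  constructor
  · intro h i hi
    cases i with
    | zero => rfl
    | succ j =>
      have := h (f (j+1)) ⟨j, by omega, rfl⟩
      exact (beq_iff_eq.mp this).symm
  · intro h x hx
    obtain ⟨j, hj, rfl⟩ := hx
    exact beq_iff_eq.mpr (h (j+1) (by omega)).symm

-- A's per-k test equals B's per-period test, for a divisor k of the length
theorem chunksOK_shift (L : List Char) (k : Nat) (hk : 1 ≤ k) (hkn : k ≤ L.length)
    (hdvd : k ∣ L.length) :
    (validate_list (create_nchunk L (k : Int)) = true) ↔
    (L.drop (L.length / k) = L.take (L.length - L.length / k)) := by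
  set c := L.length / k with hc
  have hc1 : 1 ≤ c := (Nat.one_le_div_iff (by omega)).mpr hkn
  have hkc : k * c = L.length := Nat.mul_div_cancel' hdvd
  have hcn : c ≤ L.length := Nat.div_le_self _ _
  rw [create_nchunk_eq L k, validate_list_map_range k hk]
  have hf0 : (L.drop (0 * c)).take c = L.take c := by simp
  rw [shift_iff L c hcn, ← chunks_iff L k c hc1 hkc.symm]
  constructor
  · intro h i hi
    rw [h i hi, hf0]
  · intro h i hi
    rw [h i hi, ← hf0]

-- bridging A's existential over chunk counts k and B's over chunk sizes c = n/k
theorem exists_bridge (L : List Char) (hn : 1 ≤ L.length) :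
    (∃ k, 3 ≤ k ∧ k ≤ L.length ∧ L.length % k = 0 ∧ validate_list (create_nchunk L (k : Int)) = true) ↔
    (∃ c, 1 ≤ c ∧ c ≤ L.length / 3 ∧ L.length % c = 0 ∧ L.drop c = L.take (L.length - c)) := by
  constructor
  · rintro ⟨k, hk3, hkn, hkm, hch⟩
    have hdvd : k ∣ L.length := Nat.dvd_of_mod_eq_zero hkm
    refine ⟨L.length / k, (Nat.one_le_div_iff (by omega)).mpr hkn,
      Nat.div_le_div_left hk3 (by omega), ?_, ?_⟩
    · exact Nat.mod_eq_zero_of_dvd (Nat.div_dvd_of_dvd hdvd)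
    · exact (chunksOK_shift L k (by omega) hkn hdvd).mp hch
  · rintro ⟨c, hc1, hc3, hcm, hsh⟩
    have hcd : c ∣ L.length := Nat.dvd_of_mod_eq_zero hcm
    have h3c : c * 3 ≤ L.length := (Nat.le_div_iff_mul_le (by omega)).mp hc3
    have hk3 : 3 ≤ L.length / c := (Nat.le_div_iff_mul_le (by omega)).mpr (by omega)
    have hkn : L.length / c ≤ L.length := Nat.div_le_self _ _
    have hkd : L.length / c ∣ L.length := Nat.div_dvd_of_dvd hcd
    have hcc : L.length / (L.length / c) = c := Nat.div_div_self hcd (by omega)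
    refine ⟨L.length / c, hk3, hkn, Nat.mod_eq_zero_of_dvd hkd, ?_⟩
    rw [chunksOK_shift L (L.length / c) (by omega) hkn hkd, hcc]
    exact hsh

-- A's loop returns true iff some chunk count 3 ≤ k ≤ start divides the length with all chunks equal
theorem vloopA_iff (L : List Char) : ∀ (s : Nat), 2 ≤ s →
    (vloopA L s = true ↔
      ∃ k, 3 ≤ k ∧ k ≤ s ∧ L.length % k = 0 ∧ validate_list (create_nchunk L (k : Int)) = true) := by
  intro s hs
  induction s, hs using Nat.le_induction with
  | base =>
    constructor
    · intro h; simp [vloopA] at h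
    · rintro ⟨k, hk3, hk2, -⟩; omega
  | succ s hs ih =>
    have hcast : ((s : Int) + 1) = ((s + 1 : Nat) : Int) := by push_cast; ring
    have hmod : (PySem.Int.mod (L.length : Int) ((s : Int) + 1) == 0) = (L.length % (s+1) == 0) := by
      rw [Bool.eq_iff_iff]
      simp only [PySem.Int.mod_eq_zero_iff_dvd, beq_iff_eq]
      rw [hcast, Int.natCast_dvd_natCast, Nat.dvd_iff_mod_eq_zero]
    constructor
    · intro h
      rw [show vloopA L (s+1) =
        (if s + 1 = 2 then false
         else if PySem.Int.mod (L.length : Int) ((s : Int) + 1) == 0 then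
           if validate_list (create_nchunk L ((s : Int) + 1)) then true else vloopA L s
         else vloopA L s) from rfl] at h
      rw [if_neg (by omega), hmod] at h
      by_cases h1 : L.length % (s+1) = 0
      · rw [if_pos (by simpa using h1)] at h
        by_cases h2 : validate_list (create_nchunk L ((s : Int) + 1)) = true
        · exact ⟨s + 1, by omega, le_refl _, h1, by rwa [← hcast]⟩
        · rw [if_neg h2] at h
          obtain ⟨k, a, b, c, d⟩ := ih.mp h
          exact ⟨k, a, by omega, c, d⟩
      · rw [if_neg (by simpa using h1)] at h
        obtain ⟨k, a, b, c, d⟩ := ih.mp h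
        exact ⟨k, a, by omega, c, d⟩
    · rintro ⟨k, hk3, hkle, hkmod, hkch⟩
      rw [show vloopA L (s+1) =
        (if s + 1 = 2 then false
         else if PySem.Int.mod (L.length : Int) ((s : Int) + 1) == 0 then
           if validate_list (create_nchunk L ((s : Int) + 1)) then true else vloopA L s
         else vloopA L s) from rfl]
      rw [if_neg (by omega), hmod]
      by_cases hk : k = s + 1
      · subst hk
        rw [if_pos (by simpa using hkmod), hcast, if_pos hkch]
      · have h' : vloopA L s = true := ih.mpr ⟨k, hk3, by omega, hkmod, hkch⟩
        split_ifs <;> simp [h']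

-- B returns true iff some chunk size 1 ≤ c ≤ n/3 divides n and the c-shift test holds
theorem alt_iff (number : String) :
    (validate_Nnumber_alt number = true) ↔
    ∃ c : Nat, 1 ≤ c ∧ c ≤ number.toList.length / 3 ∧ number.toList.length % c = 0 ∧
      number.toList.drop c = number.toList.take (number.toList.length - c) := by
  set L := number.toList with hL
  have h3 : PySem.Int.floordiv (L.length : Int) 3 = ((L.length / 3 : Nat) : Int) := by
    exact_mod_cast PySem.Int.floordiv_natCast L.length 3
  rw [validate_Nnumber_alt, List.any_eq_true]
  simp only [← hL, h3]
  constructor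
  · rintro ⟨c, hmem, hpred⟩
    rw [PySem.List.mem_pyRange_one] at hmem
    obtain ⟨h1, h2⟩ := hmem
    obtain ⟨cn, rfl⟩ : ∃ cn : Nat, c = (cn : Int) := ⟨c.toNat, (Int.toNat_of_nonneg (by omega)).symm⟩
    have hcn1 : 1 ≤ cn := by exact_mod_cast h1
    have hcn3 : cn ≤ L.length / 3 := by omega
    rw [Bool.and_eq_true, beq_iff_eq, beq_iff_eq] at hpred
    obtain ⟨hm, hsl⟩ := hpred
    rw [PySem.Int.mod_natCast] at hm
    rw [PySem.List.slice_from_natCast, PySem.List.slice_to_neg_natCast L cn (by omega)] at hsl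
    exact ⟨cn, hcn1, hcn3, by exact_mod_cast hm, hsl⟩
  · rintro ⟨cn, hcn1, hcn3, hm, hsl⟩
    refine ⟨(cn : Int), ?_, ?_⟩
    · rw [PySem.List.mem_pyRange_one]
      constructor <;> [exact_mod_cast hcn1; omega]
    · rw [Bool.and_eq_true, beq_iff_eq, beq_iff_eq]
      refine ⟨by rw [PySem.Int.mod_natCast]; exact_mod_cast hm, ?_⟩
      rw [PySem.List.slice_from_natCast, PySem.List.slice_to_neg_natCast L cn (by omega)]
      exact hsl

-- ===== VERDICT (by name: the statements are the Claim_ definitions above) =====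
theorem validate_Nnumber_spec : Claim_unchanged_validate_Nnumber := by
  intro number _ hpre hD
  have hn1 : 1 ≤ number.toList.length := by
    cases h : number.toList with
    | nil => exact absurd h hpre
    | cons a l => simp
  have hn2 : 2 ≤ number.toList.length := by
    rcases Nat.lt_or_ge number.toList.length 2 with h | h
    · exact absurd (by unfold D_validate_Nnumber; omega) hD
    · exact h
  apply Bool.coe_iff_coe.mp
  rw [validate_Nnumber, vloopA_iff number.toList number.toList.length hn2, alt_iff]
  exact exists_bridge number.toList hn1

theorem validate_Nnumber_changed : Claim_changed_validate_Nnumber := by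
  unfold Claim_changed_validate_Nnumber; decide

theorem validate_Nnumber_tight : Claim_exact_validate_Nnumber := by
  intro number _ _ hD
  obtain ⟨a, ha⟩ := List.length_eq_one_iff.mp hD
  have hA : validate_Nnumber number = true := by
    rw [validate_Nnumber, ha]
    rfl
  have hB : validate_Nnumber_alt number = false := by
    rw [validate_Nnumber_alt, ha]
    rfl
  rw [hA, hB]
  exact Bool.noConfusion
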